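-- pv_equiv track=rewrite | github.com/rin2401/zaswipe | run_swipe_set_score.py | count_score
-- ===== SOURCE A (Python) =====
-- def count_score(frame):
--     score = 0
--     r = 20
--     for i in range(1, frame + 1):
--         score += r
--         if i % 5==0:
--             r += 20
--
--     return score
-- ===== SOURCE B (Python) =====
-- def count_score(frame):
--     n = max(frame, 0)
--     q, rem = divmod(n, 5)
--     return 50 * q * (q + 1) + 20 * rem * (q + 1)
-- ===== Notes on version B (the rewrite author's own statement) =====
-- stated objective: faster
-- what changed: Replaced the per-frame accumulation loop by a closed-form arithmetic formula (full five-frame blocks summed via the triangular number, plus the remainder at the current rate).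
import Mathlib
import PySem

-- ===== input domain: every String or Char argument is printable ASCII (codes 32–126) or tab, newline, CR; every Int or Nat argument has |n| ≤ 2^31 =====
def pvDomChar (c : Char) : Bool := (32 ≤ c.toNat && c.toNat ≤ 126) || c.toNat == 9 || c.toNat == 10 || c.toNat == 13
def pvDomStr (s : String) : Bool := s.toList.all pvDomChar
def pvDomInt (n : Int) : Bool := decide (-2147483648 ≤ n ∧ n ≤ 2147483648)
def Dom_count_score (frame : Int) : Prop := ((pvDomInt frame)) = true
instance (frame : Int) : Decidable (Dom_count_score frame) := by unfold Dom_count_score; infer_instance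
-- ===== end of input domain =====

-- B replaces A's per-frame loop by a closed-form O(1) formula (full 5-frame blocks via a triangular sum, plus the remainder); faster asymptotically.


-- ===== PORT A =====
-- loop body: score += r; if i % 5 == 0: r += 20   (state = (score, r))
def csStep (p : Int × Int) (i : Int) : Int × Int :=
  (p.1 + p.2, if PySem.Int.mod i 5 == 0 then p.2 + 20 else p.2)

def count_score (frame : Int) : Int :=
  ((PySem.List.pyRange 1 (frame + 1) 1).foldl csStep (0, 20)).1

-- ===== PORT B =====
def count_score_alt (frame : Int) : Int :=
  let n := max frame 0
  let q := PySem.Int.floordiv n 5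
  let rem := PySem.Int.mod n 5
  50 * q * (q + 1) + 20 * rem * (q + 1)

-- ===== PRECONDITION & SPEC =====
def Spec_count_score (frame : Int) (out : Int) : Prop := out = count_score_alt frame
instance (frame : Int) (out : Int) : Decidable (Spec_count_score frame out) := by unfold Spec_count_score; infer_instance

-- ===== CLAIM (what is proved, stated in full; the proofs are below) =====
def Claim_equal_count_score : Prop := ∀ (frame : Int), Dom_count_score frame → Spec_count_score frame (count_score frame)

-- ===== LEMMAS AND PROOFS =====

-- loop invariant: after n iterations the state is the closed form (score, rate)
lemma csLoop_eq (n : Nat) :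
    (PySem.List.pyRange 1 ((n : Int) + 1) 1).foldl csStep (0, 20)
      = (((50 * (n / 5) * (n / 5 + 1) + 20 * (n % 5) * (n / 5 + 1) : Nat) : Int),
         ((20 * (n / 5 + 1) : Nat) : Int)) := by
  induction n with
  | zero =>
    rw [PySem.List.pyRange_one_eq_nil (by omega)]
    simp
  | succ m ih =>
    have hr : PySem.List.pyRange 1 (((m + 1 : Nat) : Int) + 1) 1
        = PySem.List.pyRange 1 ((m : Int) + 1) 1 ++ [(m : Int) + 1] := by
      push_cast
      exact PySem.List.pyRange_one_succ_right (by omega)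
    rw [hr, List.foldl_append, ih]
    simp only [List.foldl_cons, List.foldl_nil, csStep]
    have hmod : PySem.Int.mod ((m : Int) + 1) 5 = (((m + 1) % 5 : Nat) : Int) := by
      push_cast
      exact_mod_cast PySem.Int.mod_natCast (m + 1) 5
    rw [hmod]
    by_cases h5 : (m + 1) % 5 = 0
    · have hq : (m + 1) / 5 = m / 5 + 1 := by omega
      have hrem : m % 5 = 4 := by omega
      simp only [h5, hq, hrem, Nat.cast_zero, beq_self_eq_true, if_true, Prod.mk.injEq]
      exact ⟨by push_cast; ring, by push_cast; ring⟩
    · have hq : (m + 1) / 5 = m / 5 := by omega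
      have hrem : (m + 1) % 5 = m % 5 + 1 := by omega
      have hne : (((m + 1) % 5 : Nat) : Int) ≠ 0 := by
        exact_mod_cast h5
      rw [if_neg (by simpa using hne)]
      simp only [hq, hrem, Prod.mk.injEq]
      exact ⟨by push_cast; ring, trivial⟩

-- ===== VERDICT (by name: the statement is the Claim_ definition above) =====
theorem count_score_spec : Claim_equal_count_score := by
  intro frame _
  unfold Spec_count_score count_score count_score_alt
  by_cases hf : 0 ≤ frame
  · obtain ⟨n, rfl⟩ := Int.eq_ofNat_of_zero_le hf
    rw [csLoop_eq n]
    have hmax : max ((n : Int)) 0 = (n : Int) := by omega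
    simp only [hmax]
    have hq : PySem.Int.floordiv (n : Int) 5 = ((n / 5 : Nat) : Int) := by
      exact_mod_cast PySem.Int.floordiv_natCast n 5
    have hm : PySem.Int.mod (n : Int) 5 = ((n % 5 : Nat) : Int) := by
      exact_mod_cast PySem.Int.mod_natCast n 5
    rw [hq, hm]
    push_cast; ring
  · rw [PySem.List.pyRange_one_eq_nil (by omega)]
    have hmax : max frame 0 = 0 := by omega
    simp [hmax, PySem.Int.floordiv, PySem.Int.mod]
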